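-- pv_equiv track=rewrite | github.com/DBordeleau/advent-of-code-2025 | day9/day9.py | is_rectangle_valid
-- ===== SOURCE A (Python) =====
-- def is_rectangle_valid(tile1, tile2, boundaries):
--     min_x = min(tile1[0], tile2[0])
--     max_x = max(tile1[0], tile2[0])
--     min_y = min(tile1[1], tile2[1])
--     max_y = max(tile1[1], tile2[1])
--
--     # check if all rows in the rectangle are within boundaries
--     for y in range(min_y, max_y + 1):
--         if y not in boundaries:
--             return False
--         bound_min_x, bound_max_x = boundaries[y]
--         if min_x < bound_min_x or max_x > bound_max_x:
--             return False
--
--     return True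
-- ===== SOURCE B (Python) =====
-- def is_rectangle_valid(tile1, tile2, boundaries):
--     min_x, max_x = sorted((tile1[0], tile2[0]))
--     min_y, max_y = sorted((tile1[1], tile2[1]))
--     covered = 0
--     lo = hi = None
--     for y, (bmin, bmax) in boundaries.items():
--         if min_y <= y <= max_y:
--             covered += 1
--             lo = bmin if lo is None else max(lo, bmin)
--             hi = bmax if hi is None else min(hi, bmax)
--     if covered != max_y - min_y + 1:
--         return False
--     return lo <= min_x and max_x <= hi
-- ===== Notes on version B (the rewrite author's own statement) =====
-- stated objective: alternative
-- what changed: B replaces A's per-row loop over range(min_y, max_y+1) with per-row dict lookups and early returns by a single pass over the dict's items that counts covered rows and maintains a running min/max envelope, deciding validity once at the end.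
import Mathlib
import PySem

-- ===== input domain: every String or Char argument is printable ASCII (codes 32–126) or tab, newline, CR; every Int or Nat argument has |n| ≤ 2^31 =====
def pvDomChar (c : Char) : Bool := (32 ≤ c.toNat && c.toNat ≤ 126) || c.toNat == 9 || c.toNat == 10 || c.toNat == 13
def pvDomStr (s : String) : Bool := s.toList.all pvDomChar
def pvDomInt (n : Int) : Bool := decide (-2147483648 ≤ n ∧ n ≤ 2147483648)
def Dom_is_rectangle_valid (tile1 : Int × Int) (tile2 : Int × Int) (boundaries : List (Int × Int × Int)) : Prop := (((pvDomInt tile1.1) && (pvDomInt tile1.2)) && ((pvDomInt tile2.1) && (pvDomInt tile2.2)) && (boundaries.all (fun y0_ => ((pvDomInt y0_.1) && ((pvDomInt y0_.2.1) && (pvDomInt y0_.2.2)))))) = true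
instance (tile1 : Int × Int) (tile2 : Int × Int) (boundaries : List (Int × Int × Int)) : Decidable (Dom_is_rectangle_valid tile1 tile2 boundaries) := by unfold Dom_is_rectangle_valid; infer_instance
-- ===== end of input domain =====

-- B makes one pass over the dict items (count + running envelope) instead of A's per-row scan of the y-range; alternative decomposition.


-- ===== PORT A =====
-- the for-loop over range(min_y, max_y+1) with its two early `return False`s
-- (range is iterated lazily, as Python's range object is: one row is examined per step)
def pvCheckRows (min_x max_x : Int) (bs : List (Int × Int × Int)) (y stop : Int) : Bool :=
  if h : y < stop then
    match bs.find? (fun e => e.1 == y) with      -- `y in boundaries` / `boundaries[y]` (dict: first matching key)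
    | none => false
    | some e =>
      if min_x < e.2.1 || max_x > e.2.2 then false
      else pvCheckRows min_x max_x bs (y + 1) stop
  else true
termination_by (stop - y).toNat
decreasing_by omega

def is_rectangle_valid (tile1 : Int × Int) (tile2 : Int × Int) (boundaries : List (Int × Int × Int)) : Bool :=
  let min_x := min tile1.1 tile2.1
  let max_x := max tile1.1 tile2.1
  let min_y := min tile1.2 tile2.2
  let max_y := max tile1.2 tile2.2
  pvCheckRows min_x max_x boundaries min_y (max_y + 1)

-- ===== PORT B =====
-- one iteration of B's loop over boundaries.items(): (covered, lo, hi) accumulator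
def pvStep (min_y max_y : Int) (st : Int × Option Int × Option Int) (e : Int × Int × Int) :
    Int × Option Int × Option Int :=
  if min_y ≤ e.1 ∧ e.1 ≤ max_y then
    (st.1 + 1,
     some (match st.2.1 with | none => e.2.1 | some l => max l e.2.1),
     some (match st.2.2 with | none => e.2.2 | some h => min h e.2.2))
  else st

def is_rectangle_valid_alt (tile1 : Int × Int) (tile2 : Int × Int) (boundaries : List (Int × Int × Int)) : Bool :=
  let min_x := min tile1.1 tile2.1
  let max_x := max tile1.1 tile2.1
  let min_y := min tile1.2 tile2.2
  let max_y := max tile1.2 tile2.2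
  let st := boundaries.foldl (pvStep min_y max_y) (0, none, none)
  if st.1 ≠ max_y - min_y + 1 then false
  else
    match st.2.1, st.2.2 with
    | some lo, some hi => decide (lo ≤ min_x) && decide (max_x ≤ hi)
    | _, _ => false      -- unreachable when covered = max_y - min_y + 1 ≥ 1 (Python's lo/hi are set then)

-- ===== PRECONDITION & SPEC =====
-- Pre_ requires pairwise-distinct y keys in boundaries: the representation invariant of the Python dict
-- this association list stands for (a Python dict cannot hold duplicate keys); on duplicate-key lists A's
-- first-match lookup and B's aggregate over all bindings are both accidental.
def Pre_is_rectangle_valid (tile1 : Int × Int) (tile2 : Int × Int) (boundaries : List (Int × Int × Int)) : Prop :=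
  (boundaries.map (·.1)).Nodup
instance (tile1 : Int × Int) (tile2 : Int × Int) (boundaries : List (Int × Int × Int)) : Decidable (Pre_is_rectangle_valid tile1 tile2 boundaries) := by unfold Pre_is_rectangle_valid; infer_instance
def pvWitness_is_rectangle_valid : (Int × Int) × (Int × Int) × (List (Int × Int × Int)) :=
  ((1, 0), (2, 1), [(0, 1, 3), (1, 0, 2)])
def Spec_is_rectangle_valid (tile1 : Int × Int) (tile2 : Int × Int) (boundaries : List (Int × Int × Int)) (out : Bool) : Prop := out = is_rectangle_valid_alt tile1 tile2 boundaries
instance (tile1 : Int × Int) (tile2 : Int × Int) (boundaries : List (Int × Int × Int)) (out : Bool) : Decidable (Spec_is_rectangle_valid tile1 tile2 boundaries out) := by unfold Spec_is_rectangle_valid; infer_instance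

-- ===== CLAIM (what is proved, stated in full; the proofs are below) =====
def Claim_equal_is_rectangle_valid : Prop := ∀ (tile1 : Int × Int) (tile2 : Int × Int) (boundaries : List (Int × Int × Int)), Dom_is_rectangle_valid tile1 tile2 boundaries → Pre_is_rectangle_valid tile1 tile2 boundaries → Spec_is_rectangle_valid tile1 tile2 boundaries (is_rectangle_valid tile1 tile2 boundaries)

-- ===== LEMMAS AND PROOFS =====

-- A's per-row check as a Boolean predicate on a single row
def pvCheckA (min_x max_x : Int) (bs : List (Int × Int × Int)) (y : Int) : Bool :=
  match bs.find? (fun e => e.1 == y) with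
  | none => false
  | some e => !(min_x < e.2.1 || max_x > e.2.2)

theorem pvCheckRows_eq_all (min_x max_x : Int) (bs : List (Int × Int × Int)) (y stop : Int) :
    pvCheckRows min_x max_x bs y stop
      = (PySem.List.pyRange y stop 1).all (pvCheckA min_x max_x bs) := by
  generalize hn : (stop - y).toNat = n
  induction n generalizing y with
  | zero =>
    have hys : ¬ y < stop := by omega
    rw [pvCheckRows, dif_neg hys, PySem.List.pyRange_one_eq_nil (by omega)]
    rfl
  | succ n ih =>
    have hys : y < stop := by omega
    rw [pvCheckRows, dif_pos hys, PySem.List.pyRange_one_cons hys, List.all_cons]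
    rw [show pvCheckA min_x max_x bs y = (match bs.find? (fun e => e.1 == y) with
        | none => false
        | some e => !(min_x < e.2.1 || max_x > e.2.2)) from rfl]
    cases hfind : bs.find? (fun e => e.1 == y) with
    | none => simp
    | some e =>
      by_cases hb : (min_x < e.2.1 || max_x > e.2.2) = true
      · simp [hb]
      · simp only [hb, Bool.false_eq_true, if_neg, ih (y + 1) (by omega)]
        simp at hb
        simp [hb]

-- the unconditional body of B's loop
def pvStep' (st : Int × Option Int × Option Int) (e : Int × Int × Int) :
    Int × Option Int × Option Int :=
  (st.1 + 1,
   some (match st.2.1 with | none => e.2.1 | some l => max l e.2.1),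
   some (match st.2.2 with | none => e.2.2 | some h => min h e.2.2))

theorem fold_pvStep_eq_filter (min_y max_y : Int) (l : List (Int × Int × Int))
    (st : Int × Option Int × Option Int) :
    l.foldl (pvStep min_y max_y) st
      = (l.filter (fun e => decide (min_y ≤ e.1 ∧ e.1 ≤ max_y))).foldl pvStep' st := by
  induction l generalizing st with
  | nil => rfl
  | cons e rest ih =>
    by_cases h : min_y ≤ e.1 ∧ e.1 ≤ max_y
    · simp [h, List.foldl_cons, pvStep, pvStep', ih]
    · simp [h, List.foldl_cons, pvStep, ih]

theorem fold_pvStep'_fst (F : List (Int × Int × Int)) (st : Int × Option Int × Option Int) :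
    (F.foldl pvStep' st).1 = st.1 + F.length := by
  induction F generalizing st with
  | nil => simp
  | cons e rest ih => simp [List.foldl_cons, ih, pvStep']; ring

theorem fold_pvStep'_lo (F : List (Int × Int × Int)) (st : Int × Option Int × Option Int) :
    (F.foldl pvStep' st).2.1
      = F.foldl (fun o e => some (match o with | none => e.2.1 | some l => max l e.2.1)) st.2.1 := by
  induction F generalizing st with
  | nil => rfl
  | cons e rest ih => simp [List.foldl_cons, ih, pvStep']

theorem fold_pvStep'_hi (F : List (Int × Int × Int)) (st : Int × Option Int × Option Int) :
    (F.foldl pvStep' st).2.2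
      = F.foldl (fun o e => some (match o with | none => e.2.2 | some h => min h e.2.2)) st.2.2 := by
  induction F generalizing st with
  | nil => rfl
  | cons e rest ih => simp [List.foldl_cons, ih, pvStep']

theorem ofold_max_some (F : List (Int × Int × Int)) (a : Int) :
    F.foldl (fun o e => some (match o with | none => e.2.1 | some l => max l e.2.1)) (some a)
      = some (F.foldl (fun l e => max l e.2.1) a) := by
  induction F generalizing a with
  | nil => rfl
  | cons e rest ih => simp [List.foldl_cons, ih]

theorem ofold_min_some (F : List (Int × Int × Int)) (a : Int) :
    F.foldl (fun o e => some (match o with | none => e.2.2 | some h => min h e.2.2)) (some a)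
      = some (F.foldl (fun h e => min h e.2.2) a) := by
  induction F generalizing a with
  | nil => rfl
  | cons e rest ih => simp [List.foldl_cons, ih]

theorem fold_pvStep'_cons (f : Int × Int × Int) (rest : List (Int × Int × Int)) :
    List.foldl pvStep' ((0 : Int), (none : Option Int), (none : Option Int)) (f :: rest)
      = ((1 : Int) + rest.length,
         some (rest.foldl (fun l e => max l e.2.1) f.2.1),
         some (rest.foldl (fun h e => min h e.2.2) f.2.2)) := by
  rw [List.foldl_cons]
  have hst : pvStep' ((0 : Int), (none : Option Int), (none : Option Int)) f
      = ((1 : Int), some f.2.1, some f.2.2) := rfl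
  rw [hst]
  refine Prod.ext ?_ (Prod.ext ?_ ?_)
  · rw [fold_pvStep'_fst]
  · rw [fold_pvStep'_lo]; exact ofold_max_some rest f.2.1
  · rw [fold_pvStep'_hi]; exact ofold_min_some rest f.2.2

theorem foldl_max_le_iff (F : List (Int × Int × Int)) (a x : Int) :
    F.foldl (fun l e => max l e.2.1) a ≤ x ↔ a ≤ x ∧ ∀ e ∈ F, e.2.1 ≤ x := by
  induction F generalizing a with
  | nil => simp
  | cons e rest ih =>
    simp only [List.foldl_cons, ih, max_le_iff, List.mem_cons]
    constructor
    · rintro ⟨⟨h1, h2⟩, h3⟩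
      exact ⟨h1, by rintro f (rfl | hf); exact h2; exact h3 f hf⟩
    · rintro ⟨h1, h2⟩
      exact ⟨⟨h1, h2 e (Or.inl rfl)⟩, fun f hf => h2 f (Or.inr hf)⟩

theorem le_foldl_min_iff (F : List (Int × Int × Int)) (a x : Int) :
    x ≤ F.foldl (fun h e => min h e.2.2) a ↔ x ≤ a ∧ ∀ e ∈ F, x ≤ e.2.2 := by
  induction F generalizing a with
  | nil => simp
  | cons e rest ih =>
    simp only [List.foldl_cons, ih, le_min_iff, List.mem_cons]
    constructor
    · rintro ⟨⟨h1, h2⟩, h3⟩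
      exact ⟨h1, by rintro f (rfl | hf); exact h2; exact h3 f hf⟩
    · rintro ⟨h1, h2⟩
      exact ⟨⟨h1, h2 e (Or.inl rfl)⟩, fun f hf => h2 f (Or.inr hf)⟩

-- with pairwise-distinct keys, find? on a member's key returns that member
theorem find?_key_of_nodup (bs : List (Int × Int × Int))
    (hnd : (bs.map (·.1)).Nodup) (e : Int × Int × Int) (he : e ∈ bs) :
    bs.find? (fun x => x.1 == e.1) = some e := by
  induction bs with
  | nil => cases he
  | cons b rest ih =>
    simp only [List.map_cons, List.nodup_cons] at hnd
    rcases List.mem_cons.mp he with rfl | he'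
    · simp
    · have hb : (b.1 == e.1) = false := by
        apply beq_false_of_ne
        intro hkey
        exact hnd.1 (hkey ▸ List.mem_map_of_mem he')
      simp [hb, ih hnd.2 he']

-- the heart: A's row-by-row check ↔ B's count + envelope conditions, on Nodup keys
theorem rows_iff (min_x max_x min_y max_y : Int) (bs : List (Int × Int × Int))
    (hnd : (bs.map (·.1)).Nodup) :
    (∀ y ∈ PySem.List.pyRange min_y (max_y + 1) 1, pvCheckA min_x max_x bs y = true)
      ↔ ((bs.filter (fun e => decide (min_y ≤ e.1 ∧ e.1 ≤ max_y))).length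
            = (PySem.List.pyRange min_y (max_y + 1) 1).length
          ∧ ∀ e ∈ bs.filter (fun e => decide (min_y ≤ e.1 ∧ e.1 ≤ max_y)),
              e.2.1 ≤ min_x ∧ max_x ≤ e.2.2) := by
  set R := PySem.List.pyRange min_y (max_y + 1) 1 with hR
  set F := bs.filter (fun e => decide (min_y ≤ e.1 ∧ e.1 ≤ max_y)) with hF
  have hmemF : ∀ e, e ∈ F ↔ e ∈ bs ∧ e.1 ∈ R := by
    intro e
    simp only [hF, hR, List.mem_filter, PySem.List.mem_pyRange_one, decide_eq_true_eq]
    constructor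
    · rintro ⟨h1, h2, h3⟩; exact ⟨h1, h2, by omega⟩
    · rintro ⟨h1, h2, h3⟩; exact ⟨h1, h2, by omega⟩
  have hRnd : R.Nodup := PySem.List.nodup_pyRange_one _ _
  have hFsub : F.Sublist bs := by rw [hF]; exact List.filter_sublist
  have hFnd : (F.map (·.1)).Nodup := (hFsub.map _).nodup hnd
  have hsub : F.map (·.1) ⊆ R := by
    intro y hy
    rcases List.mem_map.mp hy with ⟨e, he, rfl⟩
    exact ((hmemF e).mp he).2
  constructor
  · intro hall
    have hRsub : R ⊆ F.map (·.1) := by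
      intro y hy
      have := hall y hy
      unfold pvCheckA at this
      cases hfind : bs.find? (fun x => x.1 == y) with
      | none => rw [hfind] at this; simp at this
      | some e =>
        have hmem : e ∈ bs := List.mem_of_find?_eq_some hfind
        have hkey : e.1 = y := by
          have := List.find?_some hfind
          exact eq_of_beq this
        have : e ∈ F := (hmemF e).mpr ⟨hmem, hkey ▸ hy⟩
        exact List.mem_map.mpr ⟨e, this, hkey⟩
    have h1 : (F.map (·.1)).length ≤ R.length :=
      (List.subperm_of_subset hFnd hsub).length_le
    have h2 : R.length ≤ (F.map (·.1)).length :=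
      (List.subperm_of_subset hRnd hRsub).length_le
    refine ⟨by simpa using Nat.le_antisymm h1 h2, ?_⟩
    intro e he
    have heb : e ∈ bs := ((hmemF e).mp he).1
    have hy : e.1 ∈ R := ((hmemF e).mp he).2
    have := hall e.1 hy
    unfold pvCheckA at this
    rw [find?_key_of_nodup bs hnd e heb] at this
    simp at this
    omega
  · rintro ⟨hlen, hgood⟩
    intro y hy
    have hperm : List.Perm (F.map (·.1)) R :=
      (List.subperm_of_subset hFnd hsub).perm_of_length_le (by simpa using hlen.ge)
    have : y ∈ F.map (·.1) := hperm.mem_iff.mpr hy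
    rcases List.mem_map.mp this with ⟨e, heF, hkey⟩
    have heb : e ∈ bs := ((hmemF e).mp heF).1
    subst hkey
    unfold pvCheckA
    rw [find?_key_of_nodup bs hnd e heb]
    have := hgood e heF
    simp
    omega


-- ===== VERDICT (by name: the statement is the Claim_ definition above) =====
theorem is_rectangle_valid_spec : Claim_equal_is_rectangle_valid := by
  intro t1 t2 bs _ hpre
  unfold Spec_is_rectangle_valid is_rectangle_valid is_rectangle_valid_alt
  dsimp only
  rw [Bool.eq_iff_iff, pvCheckRows_eq_all, List.all_eq_true,
    rows_iff _ _ _ _ _ hpre, fold_pvStep_eq_filter]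
  set mX := min t1.1 t2.1
  set MX := max t1.1 t2.1
  set mY := min t1.2 t2.2
  set MY := max t1.2 t2.2
  have hyle : mY ≤ MY := min_le_max
  have hRlen : (PySem.List.pyRange mY (MY + 1) 1).length = (MY + 1 - mY).toNat :=
    PySem.List.length_pyRange_one _ _
  set F := bs.filter (fun e => decide (mY ≤ e.1 ∧ e.1 ≤ MY)) with hF
  cases hFc : F with
  | nil =>
    simp only [List.foldl_nil, List.length_nil]
    constructor
    · rintro ⟨h, -⟩; omega
    · intro h
      rw [if_pos (by omega : ¬ ((0:Int) = MY - mY + 1))] at h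
      cases h
  | cons f rest =>
    have hc : List.foldl pvStep' ((0 : Int), none, none) (f :: rest)
        = ((1 : Int) + rest.length,
           some (rest.foldl (fun l e => max l e.2.1) f.2.1),
           some (rest.foldl (fun h e => min h e.2.2) f.2.2)) :=
      fold_pvStep'_cons f rest
    rw [hc]
    by_cases hlen : ((1 : Int) + rest.length) = MY - mY + 1
    · rw [if_neg (by push_cast; omega)]
      simp only [Bool.and_eq_true, decide_eq_true_eq, foldl_max_le_iff, le_foldl_min_iff]
      constructor
      · rintro ⟨-, hgood⟩
        exact ⟨⟨(hgood f List.mem_cons_self).1,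
                 fun e he => (hgood e (List.mem_cons_of_mem f he)).1⟩,
               ⟨(hgood f List.mem_cons_self).2,
                 fun e he => (hgood e (List.mem_cons_of_mem f he)).2⟩⟩
      · rintro ⟨⟨ha1, ha2⟩, hb1, hb2⟩
        refine ⟨by rw [hRlen]; simp only [List.length_cons]; omega, ?_⟩
        rintro e he
        rcases List.mem_cons.mp he with rfl | he'
        · exact ⟨ha1, hb1⟩
        · exact ⟨ha2 e he', hb2 e he'⟩
    · rw [if_pos (by push_cast; omega)]
      constructor
      · rintro ⟨h, -⟩; exfalso; apply hlen; rw [hRlen] at h; simp only [List.length_cons] at h; omega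
      · intro h; cases h
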